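-- pv_equiv track=rewrite | github.com/valira3/stock-spike-monitor | backtest/indicator_cache.py | _compute_session_boundary
-- ===== SOURCE A (Python) =====
-- def _compute_session_boundary(bars: list[dict]) -> list[int | None]:
--     """Index of first RTH bar per date; None for pre-market bars."""
--     n = len(bars)
--     out: list[int | None] = [None] * n
--     seen_date: dict[str, int] = {}
--     for i, b in enumerate(bars):
--         sess = b.get("session", "rth")
--         date = b.get("date") or ""
--         if sess == "rth" and date not in seen_date:
--             seen_date[date] = i
--         if date in seen_date:
--             out[i] = seen_date[date]
--     return out
-- ===== SOURCE B (Python) =====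
-- def _compute_session_boundary(bars: list[dict]) -> list[int | None]:
--     """Index of first RTH bar per date; None for pre-market bars."""
--     # Pass 1: first RTH bar index per date.
--     first_rth: dict[str, int] = {}
--     for i, b in enumerate(bars):
--         if b.get("session", "rth") == "rth":
--             first_rth.setdefault(b.get("date") or "", i)
--     # Pass 2: fill only bars at or after their date's first RTH bar.
--     out: list[int | None] = []
--     for i, b in enumerate(bars):
--         j = first_rth.get(b.get("date") or "")
--         out.append(j if j is not None and j <= i else None)
--     return out
-- ===== Notes on version B (the rewrite author's own statement) =====
-- stated objective: alternative
-- what changed: Replaces A's single interleaved discover-and-fill loop over one shared dict with two separate passes: first build a date -> first-RTH-index table, then fill each position by a lookup guarded by first_rth[date] <= i.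
import Mathlib
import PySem

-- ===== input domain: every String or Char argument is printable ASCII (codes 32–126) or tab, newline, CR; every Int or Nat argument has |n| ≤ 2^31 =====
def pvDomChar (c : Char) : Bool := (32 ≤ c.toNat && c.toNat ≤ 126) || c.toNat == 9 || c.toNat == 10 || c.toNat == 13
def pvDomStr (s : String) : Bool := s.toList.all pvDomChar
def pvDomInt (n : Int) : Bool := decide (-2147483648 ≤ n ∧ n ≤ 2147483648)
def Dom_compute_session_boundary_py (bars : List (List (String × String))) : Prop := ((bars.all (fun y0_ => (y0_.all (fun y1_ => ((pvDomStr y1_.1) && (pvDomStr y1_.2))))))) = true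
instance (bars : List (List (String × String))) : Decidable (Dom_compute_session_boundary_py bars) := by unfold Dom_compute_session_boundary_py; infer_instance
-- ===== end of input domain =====

-- B replaces A's interleaved discover-and-fill loop by two passes: build a date→first-RTH-index
-- table, then fill each slot by a guarded lookup (objective: alternative decomposition).

-- ===== PORT A =====

-- b.get("session", "rth")
def pvSess (b : List (String × String)) : String :=
  ((PySem.Dict.mk b).get? "session").getD "rth"

-- b.get("date") or ""  (None and "" both collapse to "")
def pvDate (b : List (String × String)) : String :=
  ((PySem.Dict.mk b).get? "date").getD ""

def compute_session_boundary_py (bars : List (List (String × String))) : List (Option Int) :=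
  let n := bars.length
  let st :=
    (PySem.List.enumerate bars 0).foldl
      (fun (st : PySem.Dict String Int × List (Option Int)) p =>
        let sess := pvSess p.2
        let date := pvDate p.2
        let seen := if sess == "rth" && !(st.1.contains date) then st.1.insert date p.1 else st.1
        let out := if seen.contains date then PySem.List.pySetD st.2 p.1 (some ((seen.get? date).getD 0)) else st.2
        (seen, out))
      (PySem.Dict.empty, List.replicate n (none : Option Int))
  st.2

-- ===== PORT B =====

def pvFirstRth (bars : List (List (String × String))) : PySem.Dict String Int :=
  (PySem.List.enumerate bars 0).foldl
    (fun d p => if pvSess p.2 == "rth" then d.setdefault (pvDate p.2) p.1 else d)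
    PySem.Dict.empty

def compute_session_boundary_py_alt (bars : List (List (String × String))) : List (Option Int) :=
  let fr := pvFirstRth bars
  (PySem.List.enumerate bars 0).map (fun p =>
    match fr.get? (pvDate p.2) with
    | some j => if j ≤ p.1 then some j else none
    | none => none)

-- ===== PRECONDITION & SPEC =====
def Spec_compute_session_boundary_py (bars : List (List (String × String))) (out : List (Option Int)) : Prop := out = compute_session_boundary_py_alt bars
instance (bars : List (List (String × String))) (out : List (Option Int)) : Decidable (Spec_compute_session_boundary_py bars out) := by unfold Spec_compute_session_boundary_py; infer_instance

-- ===== CLAIM (what is proved, stated in full; the proofs are below) =====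
def Claim_equal_compute_session_boundary_py : Prop := ∀ (bars : List (List (String × String))), Dom_compute_session_boundary_py bars → Spec_compute_session_boundary_py bars (compute_session_boundary_py bars)

-- ===== LEMMAS AND PROOFS =====

-- the common dict-building step (A's guarded insert = B's setdefault-under-rth)
def pvStep (d : PySem.Dict String Int) (p : Int × List (String × String)) : PySem.Dict String Int :=
  if pvSess p.2 == "rth" && !(d.contains (pvDate p.2)) then d.insert (pvDate p.2) p.1 else d

theorem pv_setdefault (d : PySem.Dict String Int) (k : String) (v : Int) :
    d.setdefault k v = if d.contains k then d else d.insert k v := by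
  by_cases h : d.contains k
  · simp [PySem.Dict.setdefault, h]
  · simp only [Bool.not_eq_true] at h
    apply PySem.Dict.ext
    simp only [if_neg (by simp [h] : ¬ d.contains k = true)]
    rw [PySem.Dict.items_insert_of_not_contains (h := h)]
    simp [PySem.Dict.setdefault, h]

theorem pvStep_eq_B (d : PySem.Dict String Int) (p : Int × List (String × String)) :
    (if pvSess p.2 == "rth" then d.setdefault (pvDate p.2) p.1 else d) = pvStep d p := by
  by_cases hs : pvSess p.2 == "rth" <;>
    by_cases hc : d.contains (pvDate p.2) <;>
      simp [pvStep, pv_setdefault, hs, hc]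

-- G1: the fold never removes or overwrites an existing binding
theorem pvG1 (l : List (Int × List (String × String))) (d : PySem.Dict String Int)
    (x : String) (j : Int) (h : d.get? x = some j) :
    (l.foldl pvStep d).get? x = some j := by
  induction l generalizing d with
  | nil => simpa using h
  | cons p l ih =>
    rw [List.foldl_cons]
    apply ih
    unfold pvStep
    split_ifs with hc
    · rw [PySem.Dict.get?_insert_of_ne]
      · exact h
      · intro hx
        subst hx
        rw [PySem.Dict.contains_eq_isSome_get?, h] at hc
        simp at hc
    · exact h

-- G2: bindings with value below every index of l must come from d
theorem pvG2 (l : List (Int × List (String × String))) (d : PySem.Dict String Int)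
    (x : String) (j : Int) (hl : ∀ p ∈ l, j < p.1)
    (h : (l.foldl pvStep d).get? x = some j) : d.get? x = some j := by
  induction l generalizing d with
  | nil => simpa using h
  | cons p l ih =>
    rw [List.foldl_cons] at h
    have h2 := ih _ (fun q hq => hl q (List.mem_cons_of_mem _ hq)) h
    unfold pvStep at h2
    split_ifs at h2 with hc
    · rw [PySem.Dict.get?_insert] at h2
      split_ifs at h2 with hx
      · exfalso
        have := hl p (List.mem_cons_self ..)
        simp only [Option.some_inj] at h2
        omega
      · exact h2
    · exact h2

theorem pv_set_append {a : Type} (pre : List a) (x v : a) (c : List a) :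
    (pre ++ x :: c).set pre.length v = pre ++ v :: c := by
  induction pre with
  | nil => rfl
  | cons h t ih => simp [ih]

def pvBval (fr : PySem.Dict String Int) (p : Int × List (String × String)) : Option Int :=
  match fr.get? (pvDate p.2) with
  | some j => if j ≤ p.1 then some j else none
  | none => none

def pvStepA (st : PySem.Dict String Int × List (Option Int))
    (p : Int × List (String × String)) : PySem.Dict String Int × List (Option Int) :=
  let seen := pvStep st.1 p
  (seen, if seen.contains (pvDate p.2) then PySem.List.pySetD st.2 p.1 (some ((seen.get? (pvDate p.2)).getD 0)) else st.2)

theorem pv_main (fr : PySem.Dict String Int) :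
    ∀ (bs : List (List (String × String))) (pre : List (Option Int))
      (d : PySem.Dict String Int)
      (_ : (PySem.List.enumerate bs (pre.length : Int)).foldl pvStep d = fr)
      (_ : ∀ (x : String) (j : Int), d.get? x = some j ↔ fr.get? x = some j ∧ j < (pre.length : Int)),
      ((PySem.List.enumerate bs (pre.length : Int)).foldl pvStepA
        (d, pre ++ List.replicate bs.length (none : Option Int))).2
      = pre ++ (PySem.List.enumerate bs (pre.length : Int)).map (pvBval fr) := by
  intro bs
  induction bs with
  | nil => intro pre d _ _; simp [PySem.List.enumerate_nil]
  | cons b bs ih =>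
    intro pre d hfold hd
    rw [PySem.List.enumerate_cons] at hfold ⊢
    set k : Int := (pre.length : Int) with hk
    set date := pvDate b with hdate
    set d' := pvStep d (k, b) with hd'def
    rw [List.foldl_cons] at hfold
    -- the dict after this step simulates fr strictly below k+1
    have hbound : ∀ q ∈ PySem.List.enumerate bs (k + 1), k < q.1 := by
      intro q hq
      rw [PySem.List.mem_enumerate_iff] at hq
      obtain ⟨m, hm, rfl⟩ := hq
      simp
      omega
    have hd2 : ∀ (x : String) (j : Int), d'.get? x = some j ↔ fr.get? x = some j ∧ j < k + 1 := by
      intro x j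
      constructor
      · intro hx
        refine ⟨by rw [← hfold]; exact pvG1 _ _ _ _ hx, ?_⟩
        rw [hd'def] at hx
        unfold pvStep at hx
        split_ifs at hx with hc
        · rw [PySem.Dict.get?_insert] at hx
          split_ifs at hx with hxd
          · simp only [Option.some_inj] at hx
            omega
          · have := (hd x j).mp hx
            omega
        · have := (hd x j).mp hx
          omega
      · rintro ⟨hfr, hj⟩
        by_cases hjk : j < k
        · -- from d, untouched by this step
          have hdx : d.get? x = some j := (hd x j).mpr ⟨hfr, hjk⟩
          rw [hd'def]
          unfold pvStep
          split_ifs with hc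
          · rw [PySem.Dict.get?_insert]
            split_ifs with hxd
            · exfalso
              subst hxd
              simp only [Bool.and_eq_true, Bool.not_eq_true'] at hc
              rw [PySem.Dict.contains_eq_isSome_get?, hdx] at hc
              simp at hc
            · exact hdx
          · exact hdx
        · -- j = k: the binding must come from this very step
          have hjeq : j = k := by omega
          subst hjeq
          apply pvG2 _ _ _ _ (fun q hq => by have := hbound q hq; omega)
          rw [hfold]; exact hfr
    -- the out list after this step
    rw [List.foldl_cons]
    have hrep : List.replicate (b :: bs).length (none : Option Int)
        = none :: List.replicate bs.length none := rfl
    set entry := pvBval fr (k, b) with hentry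
    have hout :
        pvStepA (d, pre ++ List.replicate (b :: bs).length (none : Option Int)) (k, b)
        = (d', (pre ++ [entry]) ++ List.replicate bs.length none) := by
      unfold pvStepA
      rw [← hd'def]
      simp only []
      rw [hrep]
      refine Prod.ext rfl ?_
      simp only []
      by_cases hc : d'.contains date
      · have hsome : (d'.get? date).isSome := by
          rw [← PySem.Dict.contains_eq_isSome_get?]; exact hc
        obtain ⟨j0, hj0⟩ := Option.isSome_iff_exists.mp hsome
        obtain ⟨hfrj, hlt⟩ := (hd2 date j0).mp hj0
        have hentry0 : entry = some j0 := by
          rw [hentry]; unfold pvBval; simp only [hdate.symm] at hfrj ⊢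
          rw [hfrj]; simp; omega
        rw [if_pos (by rw [← hdate]; exact hc)]
        rw [← hdate, hj0]
        simp only [Option.getD_some]
        rw [hk, PySem.List.pySetD_natCast, pv_set_append, hentry0]
        simp
      · have hentry0 : entry = none := by
          rw [hentry]; unfold pvBval; simp only [hdate.symm]
          cases hfr0 : fr.get? date with
          | none => rfl
          | some j0 =>
            have : ¬ j0 ≤ k := by
              intro hle
              have := (hd2 date j0).mpr ⟨hfr0, by omega⟩
              rw [PySem.Dict.contains_eq_isSome_get?, this] at hc
              simp at hc
            simp [this]
        rw [if_neg (by rw [← hdate]; simpa using hc), hentry0]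
        simp
    rw [hout]
    have hlen : ((pre ++ [entry]).length : Int) = k + 1 := by simp [hk]
    have := ih (pre ++ [entry]) d' (by rw [hlen]; exact hfold)
      (by rw [hlen]; exact hd2)
    rw [hlen] at this
    rw [this]
    simp
    exact hentry
  

-- ===== VERDICT (by name: the statement is the Claim_ definition above) =====
theorem compute_session_boundary_py_spec : Claim_equal_compute_session_boundary_py := by
  intro bars _
  unfold Spec_compute_session_boundary_py
  set fr := (PySem.List.enumerate bars 0).foldl pvStep PySem.Dict.empty with hfr
  have hB : pvFirstRth bars = fr := by
    rw [hfr]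
    unfold pvFirstRth
    apply List.foldl_ext
    intro a p _
    exact pvStep_eq_B a p
  have hd0 : ∀ (x : String) (j : Int),
      (PySem.Dict.empty : PySem.Dict String Int).get? x = some j ↔
        fr.get? x = some j ∧ j < ((([] : List (Option Int)).length : Nat) : Int) := by
    intro x j
    constructor
    · intro h
      rw [PySem.Dict.get?_empty] at h
      simp at h
    · rintro ⟨hfrj, hj⟩
      exfalso
      simp only [List.length_nil, Nat.cast_zero] at hj
      have hb : ∀ q ∈ PySem.List.enumerate bars (0 : Int), j < q.1 := by
        intro q hq
        rw [PySem.List.mem_enumerate_iff] at hq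
        obtain ⟨m, hm, rfl⟩ := hq
        simp
        omega
      have h2 := pvG2 _ PySem.Dict.empty x j hb hfrj
      rw [PySem.Dict.get?_empty] at h2
      simp at h2
  have hmain := pv_main fr bars [] PySem.Dict.empty
    (by simpa using hfr.symm) hd0
  simp only [List.length_nil, Nat.cast_zero, List.nil_append] at hmain
  have hA : compute_session_boundary_py bars
      = ((PySem.List.enumerate bars 0).foldl pvStepA
          (PySem.Dict.empty, List.replicate bars.length (none : Option Int))).2 := rfl
  rw [hA, hmain]
  unfold compute_session_boundary_py_alt
  rw [hB]
  rfl
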